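-- pv_equiv track=rewrite | github.com/youbin-shin/Solving-coding-problems | programmers/연습문제/완전탐색/모의고사.py | solution
-- ===== SOURCE A (Python) =====
-- def solution(answers):
--     answer = []
--     # 수포자들의 반복되는 답을 tester에 저장
--     tester = [[1, 2, 3, 4, 5], [2, 1, 2, 3, 2, 4, 2, 5], [3, 3, 1, 1, 2, 2, 4, 4, 5, 5]]
--     tester_num = [0]*3 # 점수 저장
--     idx= [0, 0, 0] # 문제의 답을 가르치는 idx 값
--     for a in range(len(answers)):
--         for t in range(3):
--             if answers[a] == tester[t][idx[t]]: # 답일 경우 점수 올리기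
--                 tester_num[t] += 1
--             idx[t] += 1
--             if idx[0] == 5: idx[0] = 0
--             if idx[1] == 8: idx[1] = 0
--             if idx[2] == 10: idx[2] = 0
--
--     # 가장 높은 점수를 받은 사람 저장하여 출력
--     max_num = max(tester_num)
--     for tn in range(len(tester_num)):
--         if tester_num[tn] == max_num:
--             answer.append(tn+1)
--     return answer
-- ===== SOURCE B (Python) =====
-- def solution(answers):
--     patterns = [[1, 2, 3, 4, 5],
--                 [2, 1, 2, 3, 2, 4, 2, 5],
--                 [3, 3, 1, 1, 2, 2, 4, 4, 5, 5]]
--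
--     def score(p):
--         # chunk the answer sheet into pattern-length blocks and zip-compare
--         # each block directly against the pattern (zip truncates the last block)
--         total, i = 0, 0
--         while i < len(answers):
--             total += sum(a == b for a, b in zip(answers[i:i + len(p)], p))
--             i += len(p)
--         return total
--
--     scores = [score(p) for p in patterns]
--     best = max(scores)
--     return [i + 1 for i, s in enumerate(scores) if s == best]
-- ===== Notes on version B (the rewrite author's own statement) =====
-- stated objective: simpler
-- what changed: Replaces A's single interleaved per-answer loop with three hand-maintained wrap-around index counters by a per-pattern block decomposition: each pattern is scored independently by chunking the answer list into pattern-length blocks and zip-comparing each block directly against the pattern, with no indices or cycling state at all; the winners are then read off the three scores.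
import Mathlib
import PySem

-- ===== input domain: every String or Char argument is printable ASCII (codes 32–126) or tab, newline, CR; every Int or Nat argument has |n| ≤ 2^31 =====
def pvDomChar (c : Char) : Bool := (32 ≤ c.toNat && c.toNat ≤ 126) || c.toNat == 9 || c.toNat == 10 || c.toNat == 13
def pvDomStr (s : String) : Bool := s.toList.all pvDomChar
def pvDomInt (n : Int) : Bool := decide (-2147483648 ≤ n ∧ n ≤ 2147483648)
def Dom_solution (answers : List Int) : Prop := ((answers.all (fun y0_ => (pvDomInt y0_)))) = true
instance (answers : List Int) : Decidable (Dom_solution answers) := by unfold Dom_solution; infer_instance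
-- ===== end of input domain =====

-- B scores each pattern independently by chunking the answers into pattern-length blocks and
-- zip-comparing each block against the pattern (no indices, no cycling counters); same O(n) cost, simpler decomposition.

-- ===== PORT A =====
-- the three repeating answer patterns (Python: tester)
def pvTester : List (List Int) := [[1, 2, 3, 4, 5], [2, 1, 2, 3, 2, 4, 2, 5], [3, 3, 1, 1, 2, 2, 4, 4, 5, 5]]

-- one iteration of A's outer loop body (the inner 'for t in range(3)' unrolled; state = (tester_num, idx))
def pvStepA (s : (Int × Int × Int) × (Int × Int × Int)) (v : Int) : (Int × Int × Int) × (Int × Int × Int) :=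
  let ((n0, n1, n2), (i0, i1, i2)) := s
  -- t = 0
  let n0 := if v == PySem.List.pyGetD (PySem.List.pyGetD pvTester 0 []) i0 0 then n0 + 1 else n0
  let i0 := i0 + 1
  let i0 := if i0 == 5 then 0 else i0
  let i1 := if i1 == 8 then 0 else i1
  let i2 := if i2 == 10 then 0 else i2
  -- t = 1
  let n1 := if v == PySem.List.pyGetD (PySem.List.pyGetD pvTester 1 []) i1 0 then n1 + 1 else n1
  let i1 := i1 + 1
  let i0 := if i0 == 5 then 0 else i0
  let i1 := if i1 == 8 then 0 else i1
  let i2 := if i2 == 10 then 0 else i2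
  -- t = 2
  let n2 := if v == PySem.List.pyGetD (PySem.List.pyGetD pvTester 2 []) i2 0 then n2 + 1 else n2
  let i2 := i2 + 1
  let i0 := if i0 == 5 then 0 else i0
  let i1 := if i1 == 8 then 0 else i1
  let i2 := if i2 == 10 then 0 else i2
  ((n0, n1, n2), (i0, i1, i2))

def solution (answers : List Int) : List Int :=
  let st := (PySem.List.pyRange 0 answers.length 1).foldl
    (fun s a => pvStepA s (PySem.List.pyGetD answers a 0)) ((0, 0, 0), (0, 0, 0))
  let tester_num := [st.1.1, st.1.2.1, st.1.2.2]
  let max_num := (PySem.List.max? tester_num (fun y => y)).getD 0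
  (PySem.List.pyRange 0 tester_num.length 1).foldl
    (fun answer tn => if PySem.List.pyGetD tester_num tn 0 == max_num then answer ++ [tn + 1] else answer) []

-- ===== PORT B =====
-- sum(a == b for a, b in zip(rest, p))
def pvZipMatch (p : List Int) (xs : List Int) : Int :=
  ((xs.zip p).map (fun ab => if ab.1 == ab.2 then (1 : Int) else 0)).sum

-- the while loop of B's score: zip-compare the block answers[i:i+len(p)] against p, then i += len(p)
-- (the 'max … 1' in the step is a totality guard only: every pattern B uses is nonempty)
def pvBScoreAux (p : List Int) (answers : List Int) (i : Nat) : Int :=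
  if i < answers.length then
    pvZipMatch p (PySem.List.slice answers (some (i : Int)) (some ((i : Int) + (p.length : Int)))) +
      pvBScoreAux p answers (i + max p.length 1)
  else 0
termination_by answers.length - i
decreasing_by omega

def solution_alt (answers : List Int) : List Int :=
  let patterns : List (List Int) := [[1, 2, 3, 4, 5], [2, 1, 2, 3, 2, 4, 2, 5], [3, 3, 1, 1, 2, 2, 4, 4, 5, 5]]
  let scores := patterns.map (fun p => pvBScoreAux p answers 0)
  let best := (PySem.List.max? scores (fun y => y)).getD 0
  (PySem.List.enumerate scores 0).filterMap (fun is => if is.2 == best then some (is.1 + 1) else none)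

-- ===== PRECONDITION & SPEC =====
def Spec_solution (answers : List Int) (out : List Int) : Prop := out = solution_alt answers
instance (answers : List Int) (out : List Int) : Decidable (Spec_solution answers out) := by unfold Spec_solution; infer_instance

-- ===== CLAIM (what is proved, stated in full; the proofs are below) =====
def Claim_equal_solution : Prop := ∀ (answers : List Int), Dom_solution answers → Spec_solution answers (solution answers)

-- ===== LEMMAS AND PROOFS =====

-- closed-form per-pattern score counted from absolute position k (i-th answer matches p[(k+i) % len p])
def pvScoreFrom (p : List Int) : List Int → Nat → Int
  | [], _ => 0
  | x :: xs, k =>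
      (if x == PySem.List.pyGetD p (((k % p.length : Nat) : Int)) 0 then (1 : Int) else 0) + pvScoreFrom p xs (k + 1)

-- the loop invariant: starting from index counters k%5, k%8, k%10 and scores (n0,n1,n2),
-- A's fold adds exactly the three pattern scores (counted from position k) and leaves the counters at k+len
theorem pvFoldA_invariant (xs : List Int) (k : Nat) (n0 n1 n2 : Int) :
    xs.foldl pvStepA ((n0, n1, n2), (((k % 5 : Nat) : Int), ((k % 8 : Nat) : Int), ((k % 10 : Nat) : Int))) =
      ((n0 + pvScoreFrom [1, 2, 3, 4, 5] xs k,
        n1 + pvScoreFrom [2, 1, 2, 3, 2, 4, 2, 5] xs k,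
        n2 + pvScoreFrom [3, 3, 1, 1, 2, 2, 4, 4, 5, 5] xs k),
       ((((k + xs.length) % 5 : Nat) : Int), (((k + xs.length) % 8 : Nat) : Int), (((k + xs.length) % 10 : Nat) : Int))) := by
  induction xs generalizing k n0 n1 n2 with
  | nil => simp [pvScoreFrom]
  | cons x xs ih =>
    rw [List.foldl_cons]
    have hstep : pvStepA ((n0, n1, n2), ((k % 5 : Nat), (k % 8 : Nat), (k % 10 : Nat))) x =
        ((if x == PySem.List.pyGetD [1, 2, 3, 4, 5] ((k % 5 : Nat) : Int) 0 then n0 + 1 else n0,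
          if x == PySem.List.pyGetD [2, 1, 2, 3, 2, 4, 2, 5] ((k % 8 : Nat) : Int) 0 then n1 + 1 else n1,
          if x == PySem.List.pyGetD [3, 3, 1, 1, 2, 2, 4, 4, 5, 5] ((k % 10 : Nat) : Int) 0 then n2 + 1 else n2),
         ((((k + 1) % 5 : Nat) : Int), (((k + 1) % 8 : Nat) : Int), (((k + 1) % 10 : Nat) : Int))) := by
      simp only [pvStepA, pvTester]
      have e0 : PySem.List.pyGetD [[1, 2, 3, 4, 5], [2, 1, 2, 3, 2, 4, 2, 5], [3, 3, 1, 1, 2, 2, 4, 4, 5, 5]] (0 : Int) ([] : List Int) = [1, 2, 3, 4, 5] := by decide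
      have e1 : PySem.List.pyGetD [[1, 2, 3, 4, 5], [2, 1, 2, 3, 2, 4, 2, 5], [3, 3, 1, 1, 2, 2, 4, 4, 5, 5]] (1 : Int) ([] : List Int) = [2, 1, 2, 3, 2, 4, 2, 5] := by decide
      have e2 : PySem.List.pyGetD [[1, 2, 3, 4, 5], [2, 1, 2, 3, 2, 4, 2, 5], [3, 3, 1, 1, 2, 2, 4, 4, 5, 5]] (2 : Int) ([] : List Int) = [3, 3, 1, 1, 2, 2, 4, 4, 5, 5] := by decide
      have w5 : (if (((k % 5 : Nat) : Int) + 1 == 5) = true then (0 : Int) else ((k % 5 : Nat) : Int) + 1) = (((k + 1) % 5 : Nat) : Int) := by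
        split <;> rename_i h <;> simp only [beq_iff_eq] at h <;> omega
      have w8 : (if (((k % 8 : Nat) : Int) + 1 == 8) = true then (0 : Int) else ((k % 8 : Nat) : Int) + 1) = (((k + 1) % 8 : Nat) : Int) := by
        split <;> rename_i h <;> simp only [beq_iff_eq] at h <;> omega
      have w10 : (if (((k % 10 : Nat) : Int) + 1 == 10) = true then (0 : Int) else ((k % 10 : Nat) : Int) + 1) = (((k + 1) % 10 : Nat) : Int) := by
        split <;> rename_i h <;> simp only [beq_iff_eq] at h <;> omega
      have s8 : ((((k % 8 : Nat) : Int) == 8) = false) := by simp; omega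
      have s10 : ((((k % 10 : Nat) : Int) == 10) = false) := by simp; omega
      have s5' : (((((k + 1) % 5 : Nat) : Int) == 5) = false) := by simp; omega
      have s8' : (((((k + 1) % 8 : Nat) : Int) == 8) = false) := by simp; omega
      simp only [e0, e1, e2, s8, s10, Bool.false_eq_true, if_false, w5, w8, w10, s5', s8']
    rw [hstep, ih (k + 1)]
    have l5 : (([1, 2, 3, 4, 5] : List Int).length) = 5 := by decide
    have l8 : (([2, 1, 2, 3, 2, 4, 2, 5] : List Int).length) = 8 := by decide
    have l10 : (([3, 3, 1, 1, 2, 2, 4, 4, 5, 5] : List Int).length) = 10 := by decide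
    simp only [pvScoreFrom, l5, l8, l10, Prod.mk.injEq, List.length_cons]
    push_cast
    refine ⟨⟨?_, ?_, ?_⟩, ?_, ?_, ?_⟩
    · split <;> ring
    · split <;> ring
    · split <;> ring
    · omega
    · omega
    · omega

theorem pvScoreFrom_append (p ys zs : List Int) (k : Nat) :
    pvScoreFrom p (ys ++ zs) k = pvScoreFrom p ys k + pvScoreFrom p zs (k + ys.length) := by
  induction ys generalizing k with
  | nil => simp [pvScoreFrom]
  | cons y ys ih =>
    simp only [List.cons_append, pvScoreFrom, ih (k + 1), List.length_cons]
    have : k + 1 + ys.length = k + (ys.length + 1) := by omega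
    rw [this, add_assoc]

theorem pvScoreFrom_shift (p zs : List Int) (k : Nat) :
    pvScoreFrom p zs (k + p.length) = pvScoreFrom p zs k := by
  induction zs generalizing k with
  | nil => rfl
  | cons z zs ih =>
    simp only [pvScoreFrom, Nat.add_mod_right]
    have : k + p.length + 1 = (k + 1) + p.length := by omega
    rw [this, ih (k + 1)]

theorem pvScoreFrom_take (p : List Int) : ∀ (xs : List Int) (k : Nat), k ≤ p.length →
    pvScoreFrom p (xs.take (p.length - k)) k =
      ((xs.zip (p.drop k)).map (fun ab => if ab.1 == ab.2 then (1 : Int) else 0)).sum := by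
  intro xs
  induction xs with
  | nil => intro k hk; simp [pvScoreFrom]
  | cons x xs ih =>
    intro k hk
    rcases Nat.eq_or_lt_of_le hk with heq | hlt
    · rw [heq]; simp [pvScoreFrom]
    · have h1 : p.length - k = (p.length - (k + 1)) + 1 := by omega
      rw [h1]
      simp only [List.take_succ_cons, pvScoreFrom]
      rw [List.drop_eq_getElem_cons hlt]
      simp only [List.zip_cons_cons, List.map_cons, List.sum_cons]
      have hg : PySem.List.pyGetD p (((k % p.length : Nat) : Int)) 0 = p[k] := by
        rw [Nat.mod_eq_of_lt hlt]
        rw [PySem.List.pyGetD_natCast p k 0]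
        exact List.getD_eq_getElem p 0 hlt
      rw [hg, ih (k + 1) hlt]

theorem pvZipMatch_take (p : List Int) : ∀ (xs : List Int), pvZipMatch p (xs.take p.length) = pvZipMatch p xs := by
  suffices h : ∀ (q xs : List Int), (xs.take q.length).zip q = xs.zip q by
    intro xs; simp [pvZipMatch, h p xs]
  intro q
  induction q with
  | nil => simp
  | cons a q ih =>
    intro xs
    cases xs with
    | nil => simp
    | cons x xs => simp [List.take_succ_cons, List.zip_cons_cons, ih xs]

-- one block of the closed-form score: matches in the first pattern-length block + the rest
theorem pvScoreFrom_block (p : List Int) (ys : List Int) :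
    pvScoreFrom p ys 0 = pvZipMatch p ys + pvScoreFrom p (ys.drop p.length) 0 := by
  have hsplit := pvScoreFrom_append p (ys.take p.length) (ys.drop p.length) 0
  rw [List.take_append_drop] at hsplit
  have htake : pvScoreFrom p (ys.take p.length) 0 = pvZipMatch p ys := by
    have := pvScoreFrom_take p ys 0 (Nat.zero_le _)
    simpa [pvZipMatch] using this
  by_cases hlen : ys.length ≤ p.length
  · rw [List.drop_eq_nil_of_le hlen]
    rw [List.take_of_length_le hlen] at htake
    simp [← htake, pvScoreFrom]
  · rw [not_le] at hlen
    have hl : (ys.take p.length).length = p.length := by simp only [List.length_take]; omega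
    rw [hsplit, htake, hl]
    have hshift := pvScoreFrom_shift p (ys.drop p.length) 0
    rw [hshift]

theorem pvBScoreAux_eq (p : List Int) (hp : 0 < p.length) (answers : List Int) :
    ∀ (n i : Nat), answers.length - i ≤ n → pvBScoreAux p answers i = pvScoreFrom p (answers.drop i) 0 := by
  intro n
  induction n with
  | zero =>
    intro i hi
    have hge : answers.length ≤ i := by omega
    rw [pvBScoreAux, if_neg (by omega), List.drop_eq_nil_of_le hge]
    rfl
  | succ n ih =>
    intro i hi
    by_cases hlt : i < answers.length
    · rw [pvBScoreAux, if_pos hlt]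
      have hmax : max p.length 1 = p.length := by omega
      have hslice : PySem.List.slice answers (some (i : Int)) (some ((i : Int) + (p.length : Int))) =
          (answers.drop i).take p.length := PySem.List.slice_natCast_add answers i p.length
      rw [hslice, pvZipMatch_take, hmax, ih (i + p.length) (by omega)]
      rw [show answers.drop (i + p.length) = (answers.drop i).drop p.length from by
        rw [List.drop_drop]]
      exact (pvScoreFrom_block p (answers.drop i)).symm
    · rw [pvBScoreAux, if_neg hlt, List.drop_eq_nil_of_le (by omega)]
      rfl

-- the two tails (max + select) agree on any three scores
theorem pvTail_eq (s0 s1 s2 : Int) :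
    (PySem.List.pyRange 0 ([s0, s1, s2] : List Int).length 1).foldl
      (fun answer tn => if PySem.List.pyGetD [s0, s1, s2] tn 0 == (PySem.List.max? [s0, s1, s2] (fun y => y)).getD 0 then answer ++ [tn + 1] else answer) [] =
    (PySem.List.enumerate ([s0, s1, s2] : List Int) 0).filterMap
      (fun is => if is.2 == (PySem.List.max? [s0, s1, s2] (fun y => y)).getD 0 then some (is.1 + 1) else none) := by
  have h3 : (([s0, s1, s2] : List Int).length : Int) = 3 := by simp
  rw [h3]
  have hr : PySem.List.pyRange 0 3 1 = [0, 1, 2] := by decide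
  rw [hr]
  simp only [List.foldl_cons, List.foldl_nil, PySem.List.enumerate_cons, PySem.List.enumerate_nil,
    List.filterMap_cons, List.filterMap_nil]
  have g0 : PySem.List.pyGetD ([s0, s1, s2] : List Int) 0 0 = s0 := by simp [PySem.List.pyGetD, PySem.List.pyGet?, PySem.List.pyIdx?]
  have g1 : PySem.List.pyGetD ([s0, s1, s2] : List Int) 1 0 = s1 := by simp [PySem.List.pyGetD, PySem.List.pyGet?, PySem.List.pyIdx?]
  have g2 : PySem.List.pyGetD ([s0, s1, s2] : List Int) 2 0 = s2 := by simp [PySem.List.pyGetD, PySem.List.pyGet?, PySem.List.pyIdx?]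
  rw [g0, g1, g2]
  split <;> split <;> split <;> simp

-- ===== VERDICT (by name: the statement is the Claim_ definition above) =====
theorem solution_spec : Claim_equal_solution := by
  intro answers _
  show solution answers = solution_alt answers
  simp only [solution, solution_alt]
  rw [PySem.List.foldl_pyRange_zero_pyGetD' answers 0 pvStepA ((0, 0, 0), (0, 0, 0))]
  have hinv := pvFoldA_invariant answers 0 0 0 0
  simp only [Nat.zero_mod, Nat.cast_zero, Nat.zero_add] at hinv
  rw [hinv]
  simp only [List.map_cons, List.map_nil, zero_add]
  have b1 : pvBScoreAux [1, 2, 3, 4, 5] answers 0 = pvScoreFrom [1, 2, 3, 4, 5] answers 0 := by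
    rw [pvBScoreAux_eq _ (by decide) answers answers.length 0 (by omega), List.drop_zero]
  have b2 : pvBScoreAux [2, 1, 2, 3, 2, 4, 2, 5] answers 0 = pvScoreFrom [2, 1, 2, 3, 2, 4, 2, 5] answers 0 := by
    rw [pvBScoreAux_eq _ (by decide) answers answers.length 0 (by omega), List.drop_zero]
  have b3 : pvBScoreAux [3, 3, 1, 1, 2, 2, 4, 4, 5, 5] answers 0 = pvScoreFrom [3, 3, 1, 1, 2, 2, 4, 4, 5, 5] answers 0 := by
    rw [pvBScoreAux_eq _ (by decide) answers answers.length 0 (by omega), List.drop_zero]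
  rw [← b1, ← b2, ← b3]
  exact pvTail_eq _ _ _
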